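-- pv_equiv track=rewrite | github.com/void-hoge/AtCrawler | atcrawler/submission_collector.py | lang2key
-- ===== SOURCE A (Python) =====
-- def lang2key(language=''):
--     key = ''
--     for ch in language:
--         if ch == ' ':
--             key += '+'
--         elif ch in '+#':
--             key += f'%{ord(ch):X}'
--         else:
--             key += ch
--     return key
-- ===== SOURCE B (Python) =====
-- def lang2key(language=''):
--     # staged whole-string substitution passes; '+' must be escaped before
--     # spaces are turned into '+', and '#' is independent of both
--     return language.replace('+', '%2B').replace('#', '%23').replace(' ', '+')
-- ===== Notes on version B (the rewrite author's own statement) =====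
-- stated objective: alternative
-- what changed: Replaces A's single per-character pass with if/elif branches and an accumulator by three staged whole-string substitution passes (a replace chain), ordered so the plus sign is escaped before spaces are encoded.
import Mathlib
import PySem

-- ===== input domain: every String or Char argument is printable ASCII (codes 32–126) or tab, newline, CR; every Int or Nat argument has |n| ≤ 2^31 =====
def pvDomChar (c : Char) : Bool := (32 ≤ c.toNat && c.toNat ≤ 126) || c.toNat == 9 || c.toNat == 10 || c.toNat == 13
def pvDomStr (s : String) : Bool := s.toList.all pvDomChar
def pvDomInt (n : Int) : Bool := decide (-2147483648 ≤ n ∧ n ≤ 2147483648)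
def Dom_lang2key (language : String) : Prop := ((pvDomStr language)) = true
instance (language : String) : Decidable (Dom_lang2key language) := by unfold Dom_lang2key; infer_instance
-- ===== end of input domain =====

-- B replaces A's single per-character accumulator loop by three staged whole-string
-- substitution passes (a replace chain), ordered so '+' is escaped before spaces become '+'.

-- ===== PORT A =====
-- hex-uppercase of a Nat, as Python's f'%{ord(ch):X}' digits
def pvHexUpper (n : Nat) : String := String.ofList ((Nat.toDigits 16 n).map Char.toUpper)

def lang2key (language : String) : String :=
  language.toList.foldl
    (fun key ch =>
      if ch = ' ' then key ++ "+"
      else if ch = '+' ∨ ch = '#' then key ++ "%" ++ pvHexUpper ch.toNat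
      else key ++ String.ofList [ch])
    ""

-- ===== PORT B =====
def lang2key_alt (language : String) : String :=
  PySem.Str.replace (PySem.Str.replace (PySem.Str.replace language "+" "%2B") "#" "%23") " " "+"

-- ===== PRECONDITION & SPEC =====
def Spec_lang2key (language : String) (out : String) : Prop := out = lang2key_alt language
instance (language : String) (out : String) : Decidable (Spec_lang2key language out) := by unfold Spec_lang2key; infer_instance

-- ===== CLAIM (what is proved, stated in full; the proofs are below) =====
def Claim_equal_lang2key : Prop := ∀ (language : String), Dom_lang2key language → Spec_lang2key language (lang2key language)

-- ===== LEMMAS AND PROOFS =====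

-- what A appends for one character, as a character list
def pvEncA (ch : Char) : List Char :=
  if ch = ' ' then ['+']
  else if ch = '+' ∨ ch = '#' then '%' :: (pvHexUpper ch.toNat).toList
  else [ch]

-- single-character substitution as a flatMap
def pvSub (c : Char) (new : List Char) (d : Char) : List Char :=
  if d = c then new else [d]

theorem pvReplace_go_single (c : Char) (new : List Char) :
    ∀ (l : List Char) (fuel : Nat) (acc : List Char), l.length ≤ fuel →
      PySem.Chars.replace.go [c] new fuel l acc
        = acc.reverse ++ l.flatMap (pvSub c new) := by
  intro l
  induction l with
  | nil =>
      intro fuel acc _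
      cases fuel <;> simp [PySem.Chars.replace.go]
  | cons d t ih =>
      intro fuel acc hlen
      cases fuel with
      | zero => simp at hlen
      | succ f =>
          simp only [PySem.Chars.replace.go]
          by_cases hdc : d = c
          · subst hdc
            have hpre : [d].isPrefixOf (d :: t) = true := by
              simp [List.isPrefixOf]
            simp only [hpre, if_pos, List.length_cons, List.length_nil,
              Nat.zero_add, List.drop_succ_cons, List.drop_zero] at *
            rw [ih f (new.reverse ++ acc) (by omega)]
            simp [pvSub]
          · have hpre : [c].isPrefixOf (d :: t) = false := by
              simp [List.isPrefixOf]; exact fun h => hdc h.symm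
            simp only [hpre]
            simp only [Bool.false_eq_true, if_false]
            rw [ih f (d :: acc) (by simpa using Nat.le_of_succ_le_succ hlen)]
            simp [pvSub, hdc]

theorem pvReplace_single (s : List Char) (c : Char) (new : List Char) :
    PySem.Chars.replace s [c] new = s.flatMap (pvSub c new) := by
  simp only [PySem.Chars.replace, List.isEmpty_cons, Bool.false_eq_true, if_false]
  exact pvReplace_go_single c new s s.length [] (le_refl _)

-- the composite of the three staged substitutions is exactly A's per-character encoding
theorem pvComposite (d : Char) :
    ((pvSub '+' "%2B".toList d).flatMap (pvSub '#' "%23".toList)).flatMap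
        (pvSub ' ' ['+']) = pvEncA d := by
  by_cases h1 : d = ' '
  · subst h1; decide
  · by_cases h2 : d = '+'
    · subst h2; decide
    · by_cases h3 : d = '#'
      · subst h3; decide
      · simp [pvSub, pvEncA, h1, h2, h3]

theorem pvFoldA (l : List Char) : ∀ acc : String,
    (l.foldl
      (fun key ch =>
        if ch = ' ' then key ++ "+"
        else if ch = '+' ∨ ch = '#' then key ++ "%" ++ pvHexUpper ch.toNat
        else key ++ String.ofList [ch])
      acc).toList = acc.toList ++ l.flatMap pvEncA := by
  induction l with
  | nil => intro acc; simp
  | cons c t ih =>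
      intro acc
      simp only [List.foldl_cons, List.flatMap_cons]
      rw [ih]
      unfold pvEncA
      split_ifs <;> simp [String.toList_append, String.toList_ofList]

theorem lang2key_toList (language : String) :
    (lang2key language).toList = language.toList.flatMap pvEncA := by
  unfold lang2key
  rw [pvFoldA]
  simp

theorem lang2key_alt_toList (language : String) :
    (lang2key_alt language).toList = language.toList.flatMap pvEncA := by
  unfold lang2key_alt
  rw [PySem.Str.toList_replace, PySem.Str.toList_replace, PySem.Str.toList_replace]
  have e1 : "+".toList = ['+'] := rfl
  have e2 : "#".toList = ['#'] := rfl
  have e3 : " ".toList = [' '] := rfl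
  rw [e1, e2, e3, pvReplace_single, pvReplace_single, pvReplace_single]
  rw [List.flatMap_assoc, List.flatMap_assoc]
  exact List.flatMap_congr (fun d _ => (List.flatMap_assoc ..).symm.trans (pvComposite d))

-- ===== VERDICT (by name: the statement is the Claim_ definition above) =====
theorem lang2key_spec : Claim_equal_lang2key := by
  intro language _
  unfold Spec_lang2key
  have h := (lang2key_toList language).trans (lang2key_alt_toList language).symm
  exact String.toList_inj.mp h
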